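-- pv_equiv track=rewrite | github.com/lantoli/AdventOfCode | 2025_go/06_trash.py | solve06a
-- ===== SOURCE A (Python) =====
-- import math
--
-- def solve06a(lines: list[str]) -> int:
--     nums = [list(map(int, line.split())) for line in lines[:-1]]
--     ops = lines[-1].split()
--     return sum(
--         math.prod(sub) if op == '*'
--         else sum(sub)
--         for x, op in enumerate(ops)
--         for sub in [[nums[y][x] for y in range(len(nums))]]
--     )
-- ===== SOURCE B (Python) =====
-- def solve06a(lines: list[str]) -> int:
--     ops = lines[-1].split()
--     n = len(ops)
--     sums = [0] * n
--     prods = [1] * n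
--     for line in lines[:-1]:
--         vals = [int(t) for t in line.split()[:n]]
--         sums = [s + v for s, v in zip(sums, vals)]
--         prods = [p * v for p, v in zip(prods, vals)]
--     return sum(p if o == '*' else s for o, s, p in zip(ops, sums, prods))
-- ===== Notes on version B (the rewrite author's own statement) =====
-- stated objective: alternative
-- what changed: B makes a single row-major pass accumulating per-column running sums and products simultaneously (zipWith-style), instead of A's column-major transpose that rebuilds each column list by indexing every row and then reduces it.
import Mathlib
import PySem

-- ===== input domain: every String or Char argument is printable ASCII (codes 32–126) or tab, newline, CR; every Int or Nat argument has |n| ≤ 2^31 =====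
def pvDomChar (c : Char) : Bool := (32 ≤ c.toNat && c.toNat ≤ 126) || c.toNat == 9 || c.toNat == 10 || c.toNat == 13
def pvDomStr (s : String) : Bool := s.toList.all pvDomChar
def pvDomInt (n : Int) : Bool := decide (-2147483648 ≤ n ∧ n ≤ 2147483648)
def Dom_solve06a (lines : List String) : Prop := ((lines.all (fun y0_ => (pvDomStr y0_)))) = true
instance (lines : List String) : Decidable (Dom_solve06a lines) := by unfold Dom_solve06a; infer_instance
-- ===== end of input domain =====

-- B replaces A's column-major pass (rebuild each column by indexing all rows, then reduce it)
-- by one row-major pass keeping running per-column sums and products; return values agree on Pre_.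

-- ===== PORT A =====
def solve06a (lines : List String) : Int :=
  let nums := (PySem.List.slice lines none (some (-1))).map
    (fun line => (PySem.Str.split₀ line).map (fun t => (PySem.Int.ofStr? t).getD 0))
  let ops := PySem.Str.split₀ (PySem.List.pyGetD lines (-1) "")
  ((PySem.List.enumerate ops 0).map (fun p =>
    let sub := (PySem.List.pyRange 0 (nums.length : Int) 1).map
      (fun y => PySem.List.pyGetD (PySem.List.pyGetD nums y []) p.1 0)
    if p.2 == "*" then sub.foldl (· * ·) 1 else sub.foldl (· + ·) 0)).foldl (· + ·) 0

-- ===== PORT B =====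
def solve06a_alt (lines : List String) : Int :=
  let ops := PySem.Str.split₀ (PySem.List.pyGetD lines (-1) "")
  let n := ops.length
  let sp := (PySem.List.slice lines none (some (-1))).foldl
    (fun (st : List Int × List Int) line =>
      let vals := (PySem.List.slice (PySem.Str.split₀ line) none (some (n : Int))).map
        (fun t => (PySem.Int.ofStr? t).getD 0)
      (List.zipWith (· + ·) st.1 vals, List.zipWith (· * ·) st.2 vals))
    (List.replicate n 0, List.replicate n 1)
  ((ops.zip (sp.1.zip sp.2)).map
    (fun q => if q.1 == "*" then q.2.2 else q.2.1)).foldl (· + ·) 0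

-- ===== PRECONDITION & SPEC =====
-- Pre_ excludes exactly the inputs where A raises: the empty list (IndexError on lines[-1]),
-- a non-integer token in a data line (ValueError), or a data row with fewer tokens than the
-- ops line (IndexError on nums[y][x]).
def Pre_solve06a (lines : List String) : Prop :=
  lines ≠ [] ∧
  ∀ line ∈ lines.dropLast,
    (∀ t ∈ PySem.Str.split₀ line, (PySem.Int.ofStr? t).isSome) ∧
    (PySem.Str.split₀ (PySem.List.pyGetD lines (-1) "")).length ≤ (PySem.Str.split₀ line).length
instance (lines : List String) : Decidable (Pre_solve06a lines) := by unfold Pre_solve06a; infer_instance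

def pvWitness_solve06a : List String := ["1 2", "3 4", "+ *"]

def Spec_solve06a (lines : List String) (out : Int) : Prop := out = solve06a_alt lines
instance (lines : List String) (out : Int) : Decidable (Spec_solve06a lines out) := by unfold Spec_solve06a; infer_instance

-- ===== CLAIM (what is proved, stated in full; the proofs are below) =====
def Claim_equal_solve06a : Prop := ∀ (lines : List String), Dom_solve06a lines → Pre_solve06a lines → Spec_solve06a lines (solve06a lines)

-- ===== LEMMAS AND PROOFS =====

-- B's row fold, characterised elementwise: both accumulators keep length n, and entry x
-- accumulates column x of the rows (sum on the left, product on the right).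
theorem pvFoldCols (rows : List (List Int)) (n : Nat) (h : ∀ r ∈ rows, n ≤ r.length)
    (s p : List Int) (hs : s.length = n) (hp : p.length = n) :
    (rows.foldl (fun (st : List Int × List Int) r =>
        (List.zipWith (· + ·) st.1 (r.take n), List.zipWith (· * ·) st.2 (r.take n))) (s, p))
      = ((List.range n).map (fun x => rows.foldl (fun a r => a + r.getD x 0) (s.getD x 0)),
         (List.range n).map (fun x => rows.foldl (fun a r => a * r.getD x 0) (p.getD x 0))) := by
  induction rows generalizing s p with
  | nil =>
    simp only [List.foldl_nil, Prod.mk.injEq]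
    refine ⟨?_, ?_⟩ <;>
      · apply List.ext_getElem
        · simp [hs, hp]
        · intro i h1 h2
          simp only [List.getElem_map, List.getElem_range]
          rw [List.getD_eq_getElem _ _ (by omega)]
  | cons r rows ih =>
    have hr : n ≤ r.length := h r (by simp)
    have h' : ∀ q ∈ rows, n ≤ q.length := fun q hq => h q (by simp [hq])
    simp only [List.foldl_cons]
    rw [ih h' _ _ (by simp only [List.length_zipWith, List.length_take]; omega)
      (by simp only [List.length_zipWith, List.length_take]; omega)]
    simp only [Prod.mk.injEq]
    refine ⟨?_, ?_⟩ <;>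
      · apply List.map_congr_left
        intro x hx
        simp only [List.mem_range] at hx
        congr 1
        rw [List.getD_eq_getElem _ _ (by simp only [List.length_zipWith, List.length_take]; omega),
          List.getElem_zipWith, List.getElem_take,
          List.getD_eq_getElem _ _ (by omega), List.getD_eq_getElem _ _ (by omega)]

-- starting from the all-zeros / all-ones accumulators
theorem pvFoldCols0 (rows : List (List Int)) (n : Nat) (h : ∀ r ∈ rows, n ≤ r.length) :
    (rows.foldl (fun (st : List Int × List Int) r =>
        (List.zipWith (· + ·) st.1 (r.take n), List.zipWith (· * ·) st.2 (r.take n)))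
      (List.replicate n 0, List.replicate n 1))
      = ((List.range n).map (fun x => rows.foldl (fun a r => a + r.getD x 0) 0),
         (List.range n).map (fun x => rows.foldl (fun a r => a * r.getD x 0) 1)) := by
  rw [pvFoldCols rows n h _ _ (by simp) (by simp)]
  simp only [Prod.mk.injEq]
  refine ⟨?_, ?_⟩ <;>
    · apply List.map_congr_left
      intro x hx
      simp only [List.mem_range] at hx
      rw [List.getD_eq_getElem _ _ (by simp [hx]), List.getElem_replicate]

-- ===== VERDICT (by name: the statement is the Claim_ definition above) =====
theorem solve06a_spec : Claim_equal_solve06a := by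
  intro lines _hdom hpre
  obtain ⟨hne, hrows⟩ := hpre
  unfold Spec_solve06a solve06a solve06a_alt
  simp only [PySem.List.slice_to_neg_one, PySem.List.slice_to_natCast]
  have hlen : ∀ r ∈ lines.dropLast.map
      (fun line => (PySem.Str.split₀ line).map (fun t => (PySem.Int.ofStr? t).getD 0)),
      (PySem.Str.split₀ (PySem.List.pyGetD lines (-1) "")).length ≤ r.length := by
    intro r hr
    obtain ⟨line, hline, rfl⟩ := List.mem_map.mp hr
    simpa using (hrows line hline).2
  have key := pvFoldCols0 (lines.dropLast.map
      (fun line => (PySem.Str.split₀ line).map (fun t => (PySem.Int.ofStr? t).getD 0)))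
    (PySem.Str.split₀ (PySem.List.pyGetD lines (-1) "")).length hlen
  rw [List.foldl_map] at key
  simp only [← List.map_take] at key ⊢
  rw [key]
  congr 1
  apply List.ext_getElem
  · simp
  · intro k h1 h2
    have hk : k < (PySem.Str.split₀ (PySem.List.pyGetD lines (-1) "")).length := by
      simpa using h1
    simp only [List.getElem_map, PySem.List.getElem_enumerate, List.getElem_zip,
      List.getElem_range]
    have hsub : (PySem.List.pyRange 0
          ((lines.dropLast.map (fun line => (PySem.Str.split₀ line).map
            (fun t => (PySem.Int.ofStr? t).getD 0))).length : Int) 1).map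
        (fun y => PySem.List.pyGetD (PySem.List.pyGetD (lines.dropLast.map
            (fun line => (PySem.Str.split₀ line).map (fun t => (PySem.Int.ofStr? t).getD 0)))
          y []) ((0 : Int) + (k : Int)) 0)
        = (lines.dropLast.map (fun line => (PySem.Str.split₀ line).map
            (fun t => (PySem.Int.ofStr? t).getD 0))).map (fun r => r.getD k 0) := by
      have hcomp : (fun y => PySem.List.pyGetD (PySem.List.pyGetD (lines.dropLast.map
            (fun line => (PySem.Str.split₀ line).map (fun t => (PySem.Int.ofStr? t).getD 0)))
          y []) ((0 : Int) + (k : Int)) 0)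
          = (fun r : List Int => r.getD k 0) ∘ (fun y => PySem.List.pyGetD (lines.dropLast.map
            (fun line => (PySem.Str.split₀ line).map (fun t => (PySem.Int.ofStr? t).getD 0))) y []) := by
        funext y
        simp [PySem.List.pyGetD_natCast]
      rw [hcomp, ← List.map_map, PySem.List.map_pyGetD_pyRange_zero']
    rw [hsub]
    simp only [List.foldl_map]
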